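-- pv_equiv track=rewrite | github.com/simsang1l/Programmers | python/level2/짝지어_제거하기.py | solution
-- ===== SOURCE A (Python) =====
-- def solution(s):
--     stack = []
--
--     for i in range(len(s)):
--         if not stack :
--             stack.append(s[i])
--         else :
--             if stack[-1] == s[i]:
--                 stack.pop()
--             else :
--                 stack.append(s[i])
--
--     if stack :
--         answer = 0
--     else :
--         answer = 1
--
--     return answer
-- ===== SOURCE B (Python) =====
-- def solution(s):
--     def remove_first_pair(t):
--         for i in range(len(t) - 1):
--             if t[i] == t[i + 1]:
--                 return t[:i] + t[i + 2:]
--         return None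
--
--     t = s
--     while True:
--         u = remove_first_pair(t)
--         if u is None:
--             break
--         t = u
--     return 1 if t == "" else 0
-- ===== Notes on version B (the rewrite author's own statement) =====
-- stated objective: alternative
-- what changed: Replaced the single-pass stack reduction with a fixpoint loop that repeatedly deletes the first adjacent equal pair until none remains, then tests emptiness; equivalence rests on confluence of adjacent-pair removal.
import Mathlib
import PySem

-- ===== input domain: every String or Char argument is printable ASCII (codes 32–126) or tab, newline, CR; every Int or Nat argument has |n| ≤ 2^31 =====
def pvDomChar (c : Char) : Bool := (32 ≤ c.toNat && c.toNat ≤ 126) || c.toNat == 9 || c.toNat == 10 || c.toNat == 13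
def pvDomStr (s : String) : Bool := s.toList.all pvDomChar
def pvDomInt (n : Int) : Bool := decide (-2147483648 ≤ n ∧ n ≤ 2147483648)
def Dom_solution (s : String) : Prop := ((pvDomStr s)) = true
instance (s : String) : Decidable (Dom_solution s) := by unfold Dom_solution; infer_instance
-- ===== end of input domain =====

-- B replaces the one-pass stack with a fixpoint loop removing the first adjacent equal pair until stable (alternative decomposition, not faster).

-- ===== PORT A =====
-- Python list `stack` with append/pop at the end is kept top-first (head = stack[-1]).
def pvStep (stack : List Char) (c : Char) : List Char :=
  match stack with
  | [] => [c]                                   -- if not stack: stack.append(s[i])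
  | top :: rest => if top = c then rest         -- stack[-1] == s[i]: stack.pop()
                   else c :: top :: rest        -- else: stack.append(s[i])

def solution (s : String) : Int :=
  let stack := s.toList.foldl pvStep []
  if stack = [] then 1 else 0                   -- if stack: answer = 0 else: answer = 1

-- ===== PORT B =====
-- remove_first_pair: scan for the first i with t[i] == t[i+1]; return t with that pair deleted, else None
def pvFindPair : List Char → Option (List Char)
  | [] => none
  | [_] => none
  | a :: b :: rest =>
      if a = b then some rest
      else (pvFindPair (b :: rest)).map (a :: ·)

theorem pvFindPair_length {t t' : List Char} (h : pvFindPair t = some t') :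
    t'.length + 2 = t.length := by
  induction t generalizing t' with
  | nil => simp [pvFindPair] at h
  | cons a t ih =>
    cases t with
    | nil => simp [pvFindPair] at h
    | cons b rest =>
      by_cases hab : a = b
      · simp [pvFindPair, hab] at h; subst h; simp
      · simp [pvFindPair, hab] at h
        obtain ⟨r, hr, rfl⟩ := h
        have := ih hr
        simpa using this

-- the `while True` loop: keep removing until remove_first_pair returns None
def pvCollapse (t : List Char) : List Char :=
  match h : pvFindPair t with
  | none => t
  | some t' => pvCollapse t'
termination_by t.length
decreasing_by have := pvFindPair_length h; omega

def solution_alt (s : String) : Int :=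
  if pvCollapse s.toList = [] then 1 else 0     -- return 1 if t == "" else 0

-- ===== PRECONDITION & SPEC =====
def Spec_solution (s : String) (out : Int) : Prop := out = solution_alt s
instance (s : String) (out : Int) : Decidable (Spec_solution s out) := by unfold Spec_solution; infer_instance

-- ===== CLAIM (what is proved, stated in full; the proofs are below) =====
def Claim_equal_solution : Prop := ∀ (s : String), Dom_solution s → Spec_solution s (solution s)

-- ===== LEMMAS AND PROOFS =====

theorem isChainNe_tail {a : Char} {l : List Char}
    (h : (a :: l).IsChain (· ≠ ·)) : l.IsChain (· ≠ ·) := by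
  cases l with
  | nil => exact List.IsChain.nil
  | cons b l => exact (List.isChain_cons_cons.mp h).2

theorem pvStep_chain {st : List Char} (h : st.IsChain (· ≠ ·)) (c : Char) :
    (pvStep st c).IsChain (· ≠ ·) := by
  match st with
  | [] => exact List.IsChain.singleton c
  | top :: rest =>
    by_cases htc : top = c
    · simpa [pvStep, htc] using isChainNe_tail h
    · simpa [pvStep, htc, List.isChain_cons_cons] using ⟨fun hct => htc hct.symm, h⟩

theorem pvStep_double {st : List Char} (h : st.IsChain (· ≠ ·)) (c : Char) :
    pvStep (pvStep st c) c = st := by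
  match st with
  | [] => simp [pvStep]
  | top :: rest =>
    by_cases htc : top = c
    · subst htc
      match rest with
      | [] => simp [pvStep]
      | r :: rs =>
        have hne : top ≠ r := (List.isChain_cons_cons.mp h).1
        simp [pvStep, Ne.symm hne]
    · simp [pvStep, htc]

theorem foldl_pvStep_findPair {t t' : List Char} (h : pvFindPair t = some t') :
    ∀ st : List Char, st.IsChain (· ≠ ·) →
      t.foldl pvStep st = t'.foldl pvStep st := by
  induction t generalizing t' with
  | nil => simp [pvFindPair] at h
  | cons a t ih =>
    cases t with
    | nil => simp [pvFindPair] at h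
    | cons b rest =>
      intro st hst
      by_cases hab : a = b
      · simp [pvFindPair, hab] at h
        subst h; subst hab
        simp [List.foldl, pvStep_double hst]
      · simp [pvFindPair, hab] at h
        obtain ⟨r, hr, rfl⟩ := h
        simpa [List.foldl] using ih hr (pvStep st a) (pvStep_chain hst a)

theorem pvFindPair_none_chain {t : List Char} (h : pvFindPair t = none) :
    t.IsChain (· ≠ ·) := by
  induction t with
  | nil => exact List.IsChain.nil
  | cons a t ih =>
    cases t with
    | nil => exact List.IsChain.singleton a
    | cons b rest =>
      by_cases hab : a = b
      · simp [pvFindPair, hab] at h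
      · simp [pvFindPair, hab] at h
        exact List.isChain_cons_cons.mpr ⟨hab, ih h⟩

-- on an irreducible list the stack pass just reverses it onto the stack
theorem foldl_pvStep_irred :
    ∀ (t : List Char), t.IsChain (· ≠ ·) →
      ∀ st : List Char,
        (∀ top r x xs, st = top :: r → t = x :: xs → top ≠ x) →
        t.foldl pvStep st = t.reverse ++ st := by
  intro t
  induction t with
  | nil => intro _ st _; simp
  | cons x t ih =>
    intro hch st hsep
    have hstep : pvStep st x = x :: st := by
      match st with
      | [] => simp [pvStep]
      | top :: rest =>
        have : top ≠ x := hsep top rest x t rfl rfl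
        simp [pvStep, this]
    have ih' := ih (isChainNe_tail hch) (x :: st) (by
      intro top r y ys h1 h2
      cases h1
      exact (List.isChain_cons_cons.mp (h2 ▸ hch)).1)
    simp only [List.foldl, hstep]
    rw [ih']
    simp

theorem pvCollapse_red (t : List Char) :
    (pvCollapse t).foldl pvStep [] = t.foldl pvStep [] := by
  unfold pvCollapse
  split
  · rfl
  · next t' h =>
    rw [pvCollapse_red t']
    exact (foldl_pvStep_findPair h [] List.IsChain.nil).symm
termination_by t.length
decreasing_by rename_i heq; have := pvFindPair_length heq; omega

theorem pvCollapse_none (t : List Char) : pvFindPair (pvCollapse t) = none := by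
  unfold pvCollapse
  split
  · assumption
  · next t' h => exact pvCollapse_none t'
termination_by t.length
decreasing_by rename_i heq; have := pvFindPair_length heq; omega

-- ===== VERDICT (by name: the statement is the Claim_ definition above) =====
theorem solution_spec : Claim_equal_solution := by
  intro s _
  unfold Spec_solution solution solution_alt
  have hnone := pvCollapse_none s.toList
  have hch := pvFindPair_none_chain hnone
  have hred : s.toList.foldl pvStep [] = (pvCollapse s.toList).reverse := by
    rw [← pvCollapse_red s.toList]
    simpa using foldl_pvStep_irred (pvCollapse s.toList) hch [] (by intro _ _ _ _ h; simp at h)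
  simp only [hred, List.reverse_eq_nil_iff]
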